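-- pv_equiv track=rewrite | github.com/SeungHwan1994/Python_coding_practice | [카카오 인턴] 키패드 누르기_2021.11.13.py | solution
-- ===== SOURCE A (Python) =====
-- def solution(numbers, hand):
--     answer = ''
--     L_list = [1, 4, 7]
--     R_list = [3, 6, 9]
--
--     distance_0 = {2 : [2], 5 : [5], 8 : [8], 0 : [0]}
--     distance_1 = {2 : [1,3,5], 5 : [4,6,2,8], 8 : [7,9,5,0], 0 : ['*','#',8] }
--     distance_2 = {2 : [4,6,8], 5 : [1,3,7,9,0], 8 : [4,6,'*','#',2], 0 : [7,5,9] }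
--     distance_3 = {2 : [7,9,0], 5 : ['*','#'], 8 : [1,3], 0 : [2,4,6] }
--     distance_4 = {2 : ['*','#'],5 : [], 8 : [], 0 : [1,3] }
--     distance_list = [distance_0,distance_1,distance_2,distance_3,distance_4]
--
--     L_hand = "*"
--     R_hand = "#"
--
--     for i in numbers:
--         if i in L_list:
--             answer += "L"
--             L_hand = i
--
--         elif i in R_list:
--             answer += "R"
--             R_hand = i
--
--         else:
--             dis = 0
--             L_dis = 0
--             for distance in distance_list:
--                 dis += 1
--                 L_dis = dis
--                 if L_hand in distance[i]:
--                     break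
--
--             dis = 0
--             R_dis = 0
--             for distance in distance_list:
--                 dis += 1
--                 R_dis = dis
--                 if R_hand in distance[i]:
--                     break
--
--             if L_dis < R_dis:
--                 answer += "L"
--                 L_hand = i
--
--             elif L_dis > R_dis:
--                 answer += "R"
--                 R_hand = i
--
--             elif L_dis == R_dis:
--                 if hand == 'left':
--                     L_hand = i
--                     answer += "L"
--                 elif hand == 'right':
--                     R_hand = i
--                     answer += "R"
--     return answer
-- ===== SOURCE B (Python) =====
-- def solution(numbers, hand):
--     pos = {1: (0, 0), 2: (0, 1), 3: (0, 2),
--            4: (1, 0), 5: (1, 1), 6: (1, 2),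
--            7: (2, 0), 8: (2, 1), 9: (2, 2),
--            '*': (3, 0), 0: (3, 1), '#': (3, 2)}
--     answer = []
--     left, right = '*', '#'
--     for n in numbers:
--         if n in (1, 4, 7):
--             answer.append('L')
--             left = n
--         elif n in (3, 6, 9):
--             answer.append('R')
--             right = n
--         else:
--             tr, tc = pos[n]
--             lr, lc = pos[left]
--             rr, rc = pos[right]
--             ld = abs(lr - tr) + abs(lc - tc)
--             rd = abs(rr - tr) + abs(rc - tc)
--             if ld < rd:
--                 answer.append('L')
--                 left = n
--             elif ld > rd:
--                 answer.append('R')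
--                 right = n
--             elif hand == 'left':
--                 answer.append('L')
--                 left = n
--             elif hand == 'right':
--                 answer.append('R')
--                 right = n
--     return ''.join(answer)
-- ===== Notes on version B (the rewrite author's own statement) =====
-- stated objective: simpler
-- what changed: Replaces A's five hand-written per-ring membership dictionaries scanned with break-loops by a single key->(row,col) coordinate map and Manhattan-distance comparison per press.
import Mathlib
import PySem

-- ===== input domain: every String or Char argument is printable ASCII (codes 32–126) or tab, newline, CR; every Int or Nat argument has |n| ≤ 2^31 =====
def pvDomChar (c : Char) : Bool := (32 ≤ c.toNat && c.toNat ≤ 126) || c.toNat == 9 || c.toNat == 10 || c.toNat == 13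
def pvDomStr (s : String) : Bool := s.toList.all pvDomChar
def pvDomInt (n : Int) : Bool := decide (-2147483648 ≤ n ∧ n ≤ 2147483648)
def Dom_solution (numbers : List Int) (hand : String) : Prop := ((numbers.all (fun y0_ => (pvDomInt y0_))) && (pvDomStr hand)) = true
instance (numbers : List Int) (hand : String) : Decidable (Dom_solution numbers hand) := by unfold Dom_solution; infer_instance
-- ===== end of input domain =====

-- B replaces A's five hand-written ring-membership tables and break-loops by a
-- coordinate map and Manhattan distances (objective: simpler/idiomatic; same cost).

-- ===== PORT A =====
-- Key models the Python value held in L_hand/R_hand and stored in the distance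
-- tables: an int, or one of the strings "*" / "#" (Python's int == str is False,
-- so mixed-list membership is exactly membership of this sum type).
inductive Key where
  | star : Key
  | hash : Key
  | num : Int → Key
deriving DecidableEq, Repr

-- distance_0 … distance_4 of A, as Python dicts keyed by int
def distanceList : List (PySem.Dict Int (List Key)) :=
  [ PySem.Dict.ofList [(2,[.num 2]),(5,[.num 5]),(8,[.num 8]),(0,[.num 0])],
    PySem.Dict.ofList [(2,[.num 1,.num 3,.num 5]),(5,[.num 4,.num 6,.num 2,.num 8]),
                       (8,[.num 7,.num 9,.num 5,.num 0]),(0,[.star,.hash,.num 8])],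
    PySem.Dict.ofList [(2,[.num 4,.num 6,.num 8]),(5,[.num 1,.num 3,.num 7,.num 9,.num 0]),
                       (8,[.num 4,.num 6,.star,.hash,.num 2]),(0,[.num 7,.num 5,.num 9])],
    PySem.Dict.ofList [(2,[.num 7,.num 9,.num 0]),(5,[.star,.hash]),
                       (8,[.num 1,.num 3]),(0,[.num 2,.num 4,.num 6])],
    PySem.Dict.ofList [(2,[.star,.hash]),(5,[]),(8,[]),(0,[.num 1,.num 3])] ]

-- A's inner 'for distance in distance_list: … break' loop; the break becomes a
-- Bool flag in the fold state (dis, last dis, broken).  'distance[i]' raises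
-- KeyError for i ∉ {0,2,5,8}; those inputs are excluded by Pre_solution, so the
-- .getD [] default is never consulted on admitted inputs.
def findDis (k : Key) (i : Int) : Int :=
  (distanceList.foldl
    (fun (st : Int × Int × Bool) d =>
      if st.2.2 then st
      else
        let dis := st.1 + 1
        if k ∈ (d.get? i).getD [] then (dis, dis, true) else (dis, dis, false))
    (0, 0, false)).2.1

-- one iteration of A's main loop over (answer, L_hand, R_hand)
def stepA (hand : String) (st : String × Key × Key) (i : Int) : String × Key × Key :=
  let answer := st.1; let L := st.2.1; let R := st.2.2
  if i ∈ ([1, 4, 7] : List Int) then (answer ++ "L", Key.num i, R)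
  else if i ∈ ([3, 6, 9] : List Int) then (answer ++ "R", L, Key.num i)
  else
    let Ldis := findDis L i
    let Rdis := findDis R i
    if Ldis < Rdis then (answer ++ "L", Key.num i, R)
    else if Ldis > Rdis then (answer ++ "R", L, Key.num i)
    else -- A's 'elif L_dis == R_dis' is always true here
      if hand = "left" then (answer ++ "L", Key.num i, R)
      else if hand = "right" then (answer ++ "R", L, Key.num i)
      else st

def solution (numbers : List Int) (hand : String) : String :=
  (numbers.foldl (stepA hand) ("", Key.star, Key.hash)).1

-- ===== PORT B =====
-- B's coordinate dict pos (keys are ints and the strings '*' / '#')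
def posDict : PySem.Dict Key (Int × Int) :=
  PySem.Dict.ofList
    [(.num 1,(0,0)),(.num 2,(0,1)),(.num 3,(0,2)),
     (.num 4,(1,0)),(.num 5,(1,1)),(.num 6,(1,2)),
     (.num 7,(2,0)),(.num 8,(2,1)),(.num 9,(2,2)),
     (.star,(3,0)),(.num 0,(3,1)),(.hash,(3,2))]

-- one iteration of B's loop over (answer list, left, right).  'pos[n]' raises
-- KeyError for n ∉ 0..9; excluded by Pre_solution, so .getD (0,0) is never used.
def stepB (hand : String) (st : List String × Key × Key) (n : Int) : List String × Key × Key :=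
  let answer := st.1; let left := st.2.1; let right := st.2.2
  if n ∈ ([1, 4, 7] : List Int) then (answer ++ ["L"], Key.num n, right)
  else if n ∈ ([3, 6, 9] : List Int) then (answer ++ ["R"], left, Key.num n)
  else
    let t := (posDict.get? (.num n)).getD (0, 0)
    let lp := (posDict.get? left).getD (0, 0)
    let rp := (posDict.get? right).getD (0, 0)
    let ld := |lp.1 - t.1| + |lp.2 - t.2|
    let rd := |rp.1 - t.1| + |rp.2 - t.2|
    if ld < rd then (answer ++ ["L"], Key.num n, right)
    else if ld > rd then (answer ++ ["R"], left, Key.num n)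
    else if hand = "left" then (answer ++ ["L"], Key.num n, right)
    else if hand = "right" then (answer ++ ["R"], left, Key.num n)
    else st

def solution_alt (numbers : List Int) (hand : String) : String :=
  PySem.Str.join "" (numbers.foldl (stepB hand) ([], Key.star, Key.hash)).1

-- ===== PRECONDITION & SPEC =====
-- Pre_ excludes numbers containing an entry outside 0..9: there A raises
-- KeyError on distance[i] (and B raises KeyError on pos[n]).
def Pre_solution (numbers : List Int) (hand : String) : Prop :=
  (numbers.all (fun i => decide (0 ≤ i ∧ i ≤ 9))) = true
instance (numbers : List Int) (hand : String) : Decidable (Pre_solution numbers hand) := by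
  unfold Pre_solution; infer_instance

def pvWitness_solution : List Int × String := ([1, 5, 2, 0, 9, 8], "right")

def Spec_solution (numbers : List Int) (hand : String) (out : String) : Prop := out = solution_alt numbers hand
instance (numbers : List Int) (hand : String) (out : String) : Decidable (Spec_solution numbers hand out) := by unfold Spec_solution; infer_instance

-- ===== CLAIM (what is proved, stated in full; the proofs are below) =====
def Claim_equal_solution : Prop := ∀ (numbers : List Int) (hand : String), Dom_solution numbers hand → Pre_solution numbers hand → Spec_solution numbers hand (solution numbers hand)

-- ===== LEMMAS AND PROOFS =====

-- the 12 keypad keys a hand can ever hold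
def ValidKey (k : Key) : Prop :=
  k ∈ ([.star, .hash, .num 0, .num 1, .num 2, .num 3, .num 4,
        .num 5, .num 6, .num 7, .num 8, .num 9] : List Key)

theorem validKey_num (i : Int) (h0 : 0 ≤ i) (h9 : i ≤ 9) : ValidKey (Key.num i) := by
  unfold ValidKey
  interval_cases i <;> simp

-- A's table distance is the Manhattan distance plus one, for every valid hand
-- key and every middle-column target: 48 closed cases
theorem findDis_eq_manhattan :
    ∀ k ∈ ([.star, .hash, .num 0, .num 1, .num 2, .num 3, .num 4,
            .num 5, .num 6, .num 7, .num 8, .num 9] : List Key),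
    ∀ i ∈ ([0, 2, 5, 8] : List Int),
      findDis k i =
        |((posDict.get? k).getD (0,0)).1 - ((posDict.get? (.num i)).getD (0,0)).1| +
        |((posDict.get? k).getD (0,0)).2 - ((posDict.get? (.num i)).getD (0,0)).2| + 1 := by
  decide

theorem join_append_singleton (l : List String) (s : String) :
    PySem.Str.join "" (l ++ [s]) = PySem.Str.join "" l ++ s := by
  have flat : ∀ (xs : List (List Char)),
      (List.intersperse ([] : List Char) xs).flatten = xs.flatten := by
    intro xs
    induction xs with
    | nil => rfl
    | cons a t ih => cases t <;> simp_all [List.intersperse]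
  have ofl : ∀ (a b : List Char),
      String.ofList (a ++ b) = String.ofList a ++ String.ofList b := by
    intro a b; apply String.ext; simp
  simp [PySem.Str.join, PySem.Chars.join, List.intercalate, flat, ofl,
        String.ofList_toList]

theorem middle_col (i : Int) (h0 : 0 ≤ i) (h9 : i ≤ 9)
    (hL : i ∉ ([1, 4, 7] : List Int)) (hR : i ∉ ([3, 6, 9] : List Int)) :
    i ∈ ([0, 2, 5, 8] : List Int) := by
  simp only [List.mem_cons, List.not_mem_nil, or_false] at *
  omega

theorem step_agree (hand : String) (lst : List String) (L R : Key)
    (hL : ValidKey L) (hR : ValidKey R) (i : Int) (h0 : 0 ≤ i) (h9 : i ≤ 9) :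
    stepA hand (PySem.Str.join "" lst, L, R) i =
      ((fun st => (PySem.Str.join "" st.1, st.2.1, st.2.2)) (stepB hand (lst, L, R) i)) := by
  unfold stepA stepB
  by_cases hmL : i ∈ ([1, 4, 7] : List Int)
  · simp [hmL, join_append_singleton]
  · by_cases hmR : i ∈ ([3, 6, 9] : List Int)
    · simp [hmL, hmR, join_append_singleton]
    · have hi := middle_col i h0 h9 hmL hmR
      have eL := findDis_eq_manhattan L hL i hi
      have eR := findDis_eq_manhattan R hR i hi
      simp only [hmL, hmR, ite_false, eL, eR]
      set dL := |((posDict.get? L).getD (0,0)).1 - ((posDict.get? (.num i)).getD (0,0)).1| +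
                |((posDict.get? L).getD (0,0)).2 - ((posDict.get? (.num i)).getD (0,0)).2| with hdL
      set dR := |((posDict.get? R).getD (0,0)).1 - ((posDict.get? (.num i)).getD (0,0)).1| +
                |((posDict.get? R).getD (0,0)).2 - ((posDict.get? (.num i)).getD (0,0)).2| with hdR
      by_cases hlt : dL < dR
      · simp [hlt, join_append_singleton]
      · by_cases hgt : dL > dR
        · simp [hlt, hgt, join_append_singleton]
        · by_cases hle : hand = "left"
          · simp [hlt, hgt, hle, join_append_singleton]
          · by_cases hri : hand = "right"
            · simp [hlt, hgt, hri, join_append_singleton]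
            · simp [hlt, hgt, hle, hri]

theorem step_valid_left (hand : String) (lst : List String) (L R : Key) (n : Int)
    (h0 : 0 ≤ n) (h9 : n ≤ 9) (hL : ValidKey L) :
    ValidKey (stepB hand (lst, L, R) n).2.1 := by
  unfold stepB
  dsimp only
  split_ifs <;> first | exact validKey_num n h0 h9 | exact hL

theorem step_valid_right (hand : String) (lst : List String) (L R : Key) (n : Int)
    (h0 : 0 ≤ n) (h9 : n ≤ 9) (hR : ValidKey R) :
    ValidKey (stepB hand (lst, L, R) n).2.2 := by
  unfold stepB
  dsimp only
  split_ifs <;> first | exact validKey_num n h0 h9 | exact hR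

theorem fold_agree (numbers : List Int) (hand : String) :
    ∀ (lst : List String) (L R : Key), (∀ i ∈ numbers, 0 ≤ i ∧ i ≤ 9) →
      ValidKey L → ValidKey R →
      numbers.foldl (stepA hand) (PySem.Str.join "" lst, L, R) =
        ((fun st => (PySem.Str.join "" st.1, st.2.1, st.2.2))
          (numbers.foldl (stepB hand) (lst, L, R))) := by
  induction numbers with
  | nil => intro lst L R _ _ _; rfl
  | cons n t ih =>
    intro lst L R hpre hL hR
    have hn := hpre n (List.mem_cons_self)
    have hstep := step_agree hand lst L R hL hR n hn.1 hn.2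
    simp only [List.foldl_cons, hstep]
    have h1 := step_valid_left hand lst L R n hn.1 hn.2 hL
    have h2 := step_valid_right hand lst L R n hn.1 hn.2 hR
    exact ih (stepB hand (lst, L, R) n).1 (stepB hand (lst, L, R) n).2.1
      (stepB hand (lst, L, R) n).2.2
      (fun i hi => hpre i (List.mem_cons_of_mem _ hi)) h1 h2

-- ===== VERDICT (by name: the statement is the Claim_ definition above) =====
theorem solution_spec : Claim_equal_solution := by
  intro numbers hand _ hpre
  unfold Pre_solution at hpre
  rw [List.all_eq_true] at hpre
  replace hpre : ∀ i ∈ numbers, 0 ≤ i ∧ i ≤ 9 := fun i hi => by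
    simpa using hpre i hi
  unfold Spec_solution solution solution_alt
  rw [show (("", Key.star, Key.hash) : String × Key × Key)
        = (PySem.Str.join "" [], Key.star, Key.hash) from by decide,
      fold_agree numbers hand [] Key.star Key.hash hpre
        (by unfold ValidKey; decide) (by unfold ValidKey; decide)]
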